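-- pv_equiv track=rewrite | github.com/owais-ch/Arrays | palindromic_series.py | pallan
-- ===== SOURCE A (Python) =====
-- def pallan (n) :
--     dict1=dict(zip([i for i in range(26)],'abcdefghijklmnopqrstuvwxyz'))
--
--     num_list=list(map(int,list(str(n))))
--
--     length1=sum(num_list)
--     length2=len(num_list)
--
--     string=''.join(list(map(lambda x:dict1[x],num_list)))
--
--     times=length1//length2
--     rem=length1%length2
--
--     string=string*times+string[0:rem]
--
--     if string==string[::-1]:
--         return True
--
--     return False
-- ===== SOURCE B (Python) =====
-- def pallan(n):
--     dict1 = dict(zip(range(26), 'abcdefghijklmnopqrstuvwxyz'))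
--     digits = [int(c) for c in str(n)]
--     base = [dict1[d] for d in digits]
--     m = len(digits)
--     L = sum(digits)
--     # virtual repeated string position i is base[i % m]; two-pointer scan, nothing materialized
--     for i in range(L // 2):
--         if base[i % m] != base[(L - 1 - i) % m]:
--             return False
--     return True
-- ===== Notes on version B (the rewrite author's own statement) =====
-- stated objective: alternative
-- what changed: B never materializes the repeated string base*times + base[:rem]: it sums the digits to get the virtual length L and runs a two-pointer palindrome scan using modular indexing base[i % m] vs base[(L-1-i) % m], while A builds the full repeated string and compares it with its reversal.
import Mathlib
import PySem

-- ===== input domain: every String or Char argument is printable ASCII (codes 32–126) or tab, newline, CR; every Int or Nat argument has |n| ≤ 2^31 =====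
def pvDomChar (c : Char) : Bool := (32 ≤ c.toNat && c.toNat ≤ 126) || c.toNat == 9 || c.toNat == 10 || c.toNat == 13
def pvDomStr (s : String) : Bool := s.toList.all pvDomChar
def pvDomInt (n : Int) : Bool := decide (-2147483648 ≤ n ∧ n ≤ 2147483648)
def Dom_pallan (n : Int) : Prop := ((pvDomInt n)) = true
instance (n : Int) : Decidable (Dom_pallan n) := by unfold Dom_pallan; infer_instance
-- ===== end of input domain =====

-- B avoids materializing the repeated string: a two-pointer palindrome scan with modular
-- indexing into the base string replaces A's build-then-reverse comparison (objective: alternative).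

-- ===== PORT A =====
def pallan (n : Int) : Bool :=
  -- dict1 = dict(zip([i for i in range(26)], 'abcdefghijklmnopqrstuvwxyz'))
  let dict1 : PySem.Dict Int Char :=
    PySem.Dict.ofList ((PySem.List.pyRange 0 26 1).zip "abcdefghijklmnopqrstuvwxyz".toList)
  -- num_list = list(map(int, list(str(n)))); int(c) raises ValueError -> none (those n are outside Pre_)
  match (PySem.Int.toChars n).mapM (fun c => PySem.Int.ofChars? [c]) with
  | none => false
  | some numList =>
    let length1 : Int := numList.sum
    let length2 : Int := PySem.List.len numList      -- ≥ 1 always: str(n) is never empty, so no ZeroDivisionError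
    -- ''.join(map(lambda x: dict1[x], num_list)); every digit is 0..9 so dict1[x] never raises (default unreachable)
    let string := numList.map (fun x => (dict1.get? x).getD ' ')
    let times := PySem.Int.floordiv length1 length2
    let rem := PySem.Int.mod length1 length2
    let string2 := PySem.List.pyRepeat string times ++ PySem.List.slice string (some 0) (some rem)
    -- if string == string[::-1]: return True / return False
    if string2 == (PySem.List.slice? string2 none none (-1)).getD [] then true else false

-- ===== PORT B =====
-- for i in range(L // 2): if base[i % m] != base[(L - 1 - i) % m]: return False / return True
-- (pyGetD default unreachable: 0 ≤ i % m < m = len(base))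
def pallanLoop (base : List Char) (m L half i : Int) : Bool :=
  if h : i < half then
    if PySem.List.pyGetD base (PySem.Int.mod i m) ' ' ≠ PySem.List.pyGetD base (PySem.Int.mod (L - 1 - i) m) ' '
    then false
    else pallanLoop base m L half (i + 1)
  else true
termination_by (half - i).toNat
decreasing_by omega

def pallan_alt (n : Int) : Bool :=
  let dict1 : PySem.Dict Int Char :=
    PySem.Dict.ofList ((PySem.List.pyRange 0 26 1).zip "abcdefghijklmnopqrstuvwxyz".toList)
  -- digits = [int(c) for c in str(n)]
  match (PySem.Int.toChars n).mapM (fun c => PySem.Int.ofChars? [c]) with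
  | none => false
  | some digits =>
    let base := digits.map (fun d => (dict1.get? d).getD ' ')
    let m : Int := PySem.List.len digits
    let L : Int := digits.sum
    pallanLoop base m L (PySem.Int.floordiv L 2) 0

-- ===== PRECONDITION & SPEC =====
-- Pre_ excludes exactly the n < 0 on which Python A raises ValueError (int('-') inside map(int, str(n))).
def Pre_pallan (n : Int) : Prop := 0 ≤ n
instance (n : Int) : Decidable (Pre_pallan n) := by unfold Pre_pallan; infer_instance
def pvWitness_pallan : Int := 12

def Spec_pallan (n : Int) (out : Bool) : Prop := out = pallan_alt n
instance (n : Int) (out : Bool) : Decidable (Spec_pallan n out) := by unfold Spec_pallan; infer_instance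

-- ===== CLAIM (what is proved, stated in full; the proofs are below) =====
def Claim_equal_pallan : Prop := ∀ (n : Int), Dom_pallan n → Pre_pallan n → Spec_pallan n (pallan n)

-- ===== LEMMAS AND PROOFS =====

-- the ten ASCII digit characters
def pvDigitChars : List Char := ['0','1','2','3','4','5','6','7','8','9']

-- every character Nat.toDigitsCore 10 emits is either from the accumulator or an ASCII digit
theorem pv_toDigitsCore_mem (f : Nat) : ∀ (n : Nat) (ds : List Char) (c : Char),
    c ∈ Nat.toDigitsCore 10 f n ds → c ∈ ds ∨ c ∈ pvDigitChars := by
  induction f with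
  | zero => intro n ds c h; simp [Nat.toDigitsCore] at h; exact Or.inl h
  | succ f ih =>
    intro n ds c h
    have hd : (n % 10).digitChar ∈ pvDigitChars := by
      have : n % 10 < 10 := Nat.mod_lt _ (by omega)
      interval_cases h : (n % 10) <;> simp [Nat.digitChar, pvDigitChars]
    rw [Nat.toDigitsCore] at h
    by_cases hz : n / 10 = 0
    · simp [hz] at h
      rcases h with rfl | h
      · exact Or.inr hd
      · exact Or.inl h
    · simp [hz] at h
      rcases ih (n / 10) _ c h with h' | h'
      · rcases List.mem_cons.1 h' with rfl | h''
        · exact Or.inr hd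
        · exact Or.inl h''
      · exact Or.inr h'

-- characters of str(n) for 0 ≤ n are ASCII digits
theorem pv_toChars_mem {n : Int} (hn : 0 ≤ n) {c : Char}
    (hc : c ∈ PySem.Int.toChars n) : c ∈ pvDigitChars := by
  unfold PySem.Int.toChars at hc
  rw [if_neg (by omega)] at hc
  rcases pv_toDigitsCore_mem _ _ _ _ hc with h | h
  · simp at h
  · exact h

-- int(c) of an ASCII digit character is its value
theorem pv_ofChars_digit_val {c : Char} (hc : c ∈ pvDigitChars) :
    PySem.Int.ofChars? [c] = some ((c.toNat : Int) - 48) ∧ 48 ≤ c.toNat ∧ c.toNat ≤ 57 := by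
  fin_cases hc <;> exact ⟨by rfl, by decide, by decide⟩

theorem pv_ofChars_digit {c : Char} (hc : c ∈ pvDigitChars) {d : Int}
    (hd : PySem.Int.ofChars? [c] = some d) : 0 ≤ d ∧ d ≤ 9 := by
  obtain ⟨h1, h2, h3⟩ := pv_ofChars_digit_val hc
  rw [h1] at hd
  injection hd with h
  omega

-- str(n) is never empty
theorem pv_toChars_ne_nil (n : Int) : PySem.Int.toChars n ≠ [] := by
  have key : ∀ (f n : Nat) (ds : List Char), ds.length ≤ (Nat.toDigitsCore 10 f n ds).length := by
    intro f
    induction f with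
    | zero => intro n ds; simp [Nat.toDigitsCore]
    | succ f ih =>
      intro n ds
      rw [Nat.toDigitsCore]
      by_cases hz : n / 10 = 0
      · simp [hz]
      · simp only [if_neg hz]
        calc ds.length ≤ (((n % 10).digitChar :: ds)).length := by simp
          _ ≤ _ := ih _ _
  have key2 : ∀ (f n : Nat) (ds : List Char), ds.length + 1 ≤ (Nat.toDigitsCore 10 (f + 1) n ds).length := by
    intro f n ds
    rw [Nat.toDigitsCore]
    by_cases hz : n / 10 = 0
    · simp [hz]
    · simp only [if_neg hz]
      calc ds.length + 1 = (((n % 10).digitChar :: ds)).length := by simp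
        _ ≤ _ := key _ _ _
  unfold PySem.Int.toChars
  split
  · simp
  · intro h
    have := key2 n.toNat n.toNat []
    unfold Nat.toDigits at h
    rw [h] at this
    simp at this

-- facts about a successful mapM over Option
theorem pv_mapM_facts {α β : Type} (f : α → Option β) : ∀ (xs : List α) (ys : List β),
    xs.mapM f = some ys → ys.length = xs.length ∧ ∀ y ∈ ys, ∃ x ∈ xs, f x = some y := by
  intro xs
  induction xs with
  | nil => intro ys h; simp_all
  | cons x xs ih =>
    intro ys h
    rw [List.mapM_cons] at h
    cases hx : f x with
    | none => simp [hx] at h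
    | some y =>
      cases hys : xs.mapM f with
      | none => simp [hx, hys] at h
      | some ys' =>
        simp [hx, hys] at h
        obtain ⟨hlen, hmem⟩ := ih ys' hys
        subst h
        constructor
        · simp [hlen]
        · intro z hz
          rcases List.mem_cons.1 hz with rfl | hz'
          · exact ⟨x, List.mem_cons_self, hx⟩
          · obtain ⟨w, hw1, hw2⟩ := hmem z hz'
            exact ⟨w, List.mem_cons_of_mem _ hw1, hw2⟩

-- indexing into the flattened replication is modular indexing into the base
theorem pv_flatten_replicate_getElem? {α : Type} (base : List α) (hb : base ≠ []) (t : Nat) :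
    ∀ (i : Nat), i < t * base.length →
    (List.replicate t base).flatten[i]? = base[i % base.length]? := by
  induction t with
  | zero => intro i hi; simp at hi
  | succ t ih =>
    intro i hi
    rw [List.replicate_succ, List.flatten_cons]
    by_cases h : i < base.length
    · rw [List.getElem?_append_left h, Nat.mod_eq_of_lt h]
    · rw [Nat.not_lt] at h
      rw [List.getElem?_append_right h]
      have hlen : 0 < base.length := List.length_pos_iff.2 hb
      have : (i - base.length) % base.length = i % base.length := by
        conv_rhs => rw [show i = (i - base.length) + base.length by omega]
        rw [Nat.add_mod_right]
      rw [← this]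
      have hsm : (t + 1) * base.length = t * base.length + base.length := Nat.succ_mul _ _
      exact ih _ (by omega)

-- the repeated string A materializes (proof-only definition)
def pvRep (base : List Char) (L : Nat) : List Char :=
  (List.replicate (L / base.length) base).flatten ++ base.take (L % base.length)

theorem pv_rep_length (base : List Char) (hb : base ≠ []) (L : Nat) :
    (pvRep base L).length = L := by
  have hlen : 0 < base.length := List.length_pos_iff.2 hb
  have hm := Nat.mod_lt L hlen
  have hdm := Nat.div_add_mod L base.length
  have hcomm : base.length * (L / base.length) = (L / base.length) * base.length :=
    Nat.mul_comm _ _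
  simp [pvRep, List.length_flatten, List.map_replicate, List.sum_replicate, Nat.min_eq_left hm.le,
    smul_eq_mul]
  omega

theorem pv_rep_getElem? (base : List Char) (hb : base ≠ []) (L i : Nat) (hi : i < L) :
    (pvRep base L)[i]? = base[i % base.length]? := by
  have hlen : 0 < base.length := List.length_pos_iff.2 hb
  have hflatlen : (List.replicate (L / base.length) base).flatten.length = (L / base.length) * base.length := by
    simp [List.length_flatten, List.map_replicate, List.sum_replicate, smul_eq_mul]
  have hdm := Nat.div_add_mod L base.length
  have hcomm : base.length * (L / base.length) = (L / base.length) * base.length :=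
    Nat.mul_comm _ _
  unfold pvRep
  by_cases h : i < (L / base.length) * base.length
  · rw [List.getElem?_append_left (by omega)]
    exact pv_flatten_replicate_getElem? base hb _ i h
  · rw [Nat.not_lt] at h
    rw [List.getElem?_append_right (by omega), hflatlen]
    have hm : L % base.length < base.length := Nat.mod_lt _ hlen
    have h3 : i - (L / base.length) * base.length + (L / base.length) * base.length = i :=
      Nat.sub_add_cancel h
    have hrange : i - (L / base.length) * base.length < L % base.length := by omega
    rw [List.getElem?_take_of_lt hrange]
    congr 1
    conv_rhs => rw [show i = (i - (L / base.length) * base.length) + (L / base.length) * base.length by omega]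
    rw [Nat.add_mul_mod_self_right]
    exact (Nat.mod_eq_of_lt (by omega)).symm

-- palindrome by indices
theorem pv_palindrome_iff (l : List Char) :
    (l = l.reverse) ↔ (∀ i, i < l.length → l[i]? = l[l.length - 1 - i]?) := by
  constructor
  · intro h i hi
    conv_lhs => rw [h]
    rw [List.getElem?_reverse hi]
  · intro h
    apply List.ext_getElem?
    intro i
    by_cases hi : i < l.length
    · rw [List.getElem?_reverse hi]
      exact h i hi
    · rw [Nat.not_lt] at hi
      rw [List.getElem?_eq_none_iff.2 (by simpa using hi),
        List.getElem?_eq_none_iff.2 (by simpa using hi)]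

-- half-range check suffices
theorem pv_half_iff (L : Nat) (g : Nat → Option Char) :
    (∀ i, i < L → g i = g (L - 1 - i)) ↔ (∀ i, i < L / 2 → g i = g (L - 1 - i)) := by
  constructor
  · intro h i hi; exact h i (by omega)
  · intro h i hi
    by_cases h1 : i < L / 2
    · exact h i h1
    · by_cases h2 : L - 1 - i < L / 2
      · have := h (L - 1 - i) h2
        rw [show L - 1 - (L - 1 - i) = i by omega] at this
        exact this.symm
      · rw [show L - 1 - i = i by omega]

-- the two-pointer loop decides exactly the half-range condition
theorem pv_pallanLoop_spec (base : List Char) (m L half : Int) : ∀ (i : Int),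
    (pallanLoop base m L half i = true ↔
      ∀ j : Int, i ≤ j → j < half →
        PySem.List.pyGetD base (PySem.Int.mod j m) ' ' =
        PySem.List.pyGetD base (PySem.Int.mod (L - 1 - j) m) ' ') := by
  intro i
  induction i using pallanLoop.induct base m L half with
  | case1 i h htest =>
    rw [pallanLoop, dif_pos h, if_pos htest]
    simp only [Bool.false_eq_true, false_iff]
    intro hall
    exact htest (hall i le_rfl h)
  | case2 i h htest ih =>
    rw [pallanLoop, dif_pos h, if_neg htest]
    rw [ih]
    constructor
    · intro hall j hj1 hj2
      rcases eq_or_lt_of_le hj1 with rfl | hlt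
      · exact not_ne_iff.1 htest
      · exact hall j (by omega) hj2
    · intro hall j hj1 hj2
      exact hall j (by omega) hj2
  | case3 i h =>
    rw [pallanLoop, dif_neg h]
    simp only [true_iff]
    intro j hj1 hj2
    omega

theorem pv_getD_iff (base : List Char) (a b : Nat) (ha : a < base.length) (hb : b < base.length) :
    base[a]? = base[b]? ↔ base.getD a ' ' = base.getD b ' ' := by
  rw [List.getD_eq_getElem?_getD, List.getD_eq_getElem?_getD]
  constructor
  · intro h; rw [h]
  · rw [List.getElem?_eq_getElem ha, List.getElem?_eq_getElem hb]
    simp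

theorem pv_pyGetD_mod (base : List Char) (k : Nat) :
    PySem.List.pyGetD base (PySem.Int.mod (k : Int) (base.length : Int)) ' ' =
      base.getD (k % base.length) ' ' := by
  rw [show PySem.Int.mod (k:Int) (base.length:Int) = ((k % base.length : Nat) : Int) from
    by exact_mod_cast PySem.Int.mod_natCast k base.length]
  exact PySem.List.pyGetD_natCast base _ ' '

-- the core equivalence, over an arbitrary nonempty base string and virtual length
theorem pv_core (base : List Char) (hb : base ≠ []) (LN : Nat) :
    ((pvRep base LN) == (pvRep base LN).reverse) =
      pallanLoop base (base.length : Int) (LN : Int) (PySem.Int.floordiv (LN : Int) 2) 0 := by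
  have hlen : 0 < base.length := List.length_pos_iff.2 hb
  apply Bool.coe_iff_coe.mp
  rw [beq_iff_eq, pv_palindrome_iff, pv_rep_length base hb,
    pv_pallanLoop_spec base (base.length : Int) (LN : Int) (PySem.Int.floordiv (LN : Int) 2) 0]
  have hhalf : PySem.Int.floordiv (LN:Int) 2 = ((LN / 2 : Nat) : Int) := by
    exact_mod_cast PySem.Int.floordiv_natCast LN 2
  have step1 : (∀ i, i < LN → (pvRep base LN)[i]? = (pvRep base LN)[LN - 1 - i]?) ↔
      (∀ i, i < LN → base[i % base.length]? = base[(LN - 1 - i) % base.length]?) :=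
    forall_congr' fun i => imp_congr_right fun hi => by
      rw [pv_rep_getElem? base hb LN i hi, pv_rep_getElem? base hb LN (LN - 1 - i) (by omega)]
  rw [step1, pv_half_iff LN (fun i => base[i % base.length]?)]
  constructor
  · intro h j hj0 hjh
    set k := j.toNat with hk
    have hjk : j = (k : Int) := by omega
    have hkh : k < LN / 2 := by
      rw [hjk, hhalf] at hjh; exact_mod_cast hjh
    have hkL : k < LN := by omega
    have hmirror : (LN : Int) - 1 - (k : Int) = (((LN - 1 - k : Nat)) : Int) := by omega
    rw [hjk, hmirror, pv_pyGetD_mod base k, pv_pyGetD_mod base (LN - 1 - k)]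
    exact (pv_getD_iff base _ _ (Nat.mod_lt _ hlen) (Nat.mod_lt _ hlen)).mp (h k hkh)
  · intro h i hih
    have hiL : i < LN := by omega
    have h' := h (i : Int) (by omega) (by rw [hhalf]; exact_mod_cast hih)
    rw [show (LN : Int) - 1 - (i : Int) = (((LN - 1 - i : Nat)) : Int) from by omega,
      pv_pyGetD_mod base i, pv_pyGetD_mod base (LN - 1 - i)] at h'
    exact (pv_getD_iff base _ _ (Nat.mod_lt _ hlen) (Nat.mod_lt _ hlen)).mpr h'

-- ===== VERDICT (by name: the statement is the Claim_ definition above) =====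
theorem pallan_spec : Claim_equal_pallan := by
  intro n _ hpre
  unfold Spec_pallan pallan pallan_alt
  cases hE : (PySem.Int.toChars n).mapM (fun c => PySem.Int.ofChars? [c]) with
  | none => simp
  | some ds =>
    dsimp only
    obtain ⟨hlen_eq, hmem⟩ := pv_mapM_facts _ _ _ hE
    have hds : ds ≠ [] := by
      intro h
      apply pv_toChars_ne_nil n
      rw [h] at hlen_eq
      exact List.length_eq_zero_iff.1 hlen_eq.symm
    have hnonneg : ∀ d ∈ ds, 0 ≤ d := by
      intro d hd
      obtain ⟨c, hc1, hc2⟩ := hmem d hd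
      exact (pv_ofChars_digit (pv_toChars_mem hpre hc1) hc2).1
    have hsum : 0 ≤ ds.sum := List.sum_nonneg hnonneg
    set base := ds.map (fun x =>
      ((PySem.Dict.ofList ((PySem.List.pyRange 0 26 1).zip "abcdefghijklmnopqrstuvwxyz".toList) :
        PySem.Dict Int Char).get? x).getD ' ') with hbase
    have hblen : base.length = ds.length := by simp [hbase]
    have hbne : base ≠ [] := by
      intro h
      exact hds (List.map_eq_nil_iff.1 h)
    set LN := ds.sum.toNat with hLN
    have hsumc : ds.sum = (LN : Int) := by omega
    have hlenc : PySem.List.len ds = (base.length : Int) := by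
      rw [PySem.List.len_eq, hblen]
    have htimes : (PySem.Int.floordiv ds.sum (PySem.List.len ds)).toNat = LN / base.length := by
      rw [hsumc, hlenc, show PySem.Int.floordiv (LN : Int) (base.length : Int) =
        ((LN / base.length : Nat) : Int) from by exact_mod_cast PySem.Int.floordiv_natCast LN base.length]
      exact Int.toNat_natCast _
    have hrem : PySem.Int.mod ds.sum (PySem.List.len ds) = ((LN % base.length : Nat) : Int) := by
      rw [hsumc, hlenc]
      exact_mod_cast PySem.Int.mod_natCast LN base.length
    have hstring2 : PySem.List.pyRepeat base (PySem.Int.floordiv ds.sum (PySem.List.len ds)) ++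
        PySem.List.slice base (some 0) (some (PySem.Int.mod ds.sum (PySem.List.len ds))) =
        pvRep base LN := by
      rw [hrem]
      show (List.replicate _ base).flatten ++ _ = _
      rw [htimes]
      unfold pvRep
      congr 1
      rw [PySem.List.slice_zero_start, PySem.List.slice_to_natCast]
    rw [hstring2, show (PySem.List.slice? (pvRep base LN) none none (-1)).getD [] =
      (pvRep base LN).reverse from by rw [PySem.List.slice?_none_none_neg_one]; rfl]
    rw [hsumc, hlenc]
    rw [← pv_core base hbne LN]
    cases hx : ((pvRep base LN) == (pvRep base LN).reverse) <;> simp
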